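-- pv_equiv track=rewrite | github.com/thomas-xza/COMP15212_operating_systems | caching/cache.py | delete_data_from_ds
-- ===== SOURCE A (Python) =====
-- def delete_data_from_ds(ds, key):
--
--     #  Iterates through data-struct, in search of key.
--     #  Upon finding key, will delete entry in data-struct,
--     #    then prepend an empty entry to top of data-struct.
--
--     pos = 0
--
--     key_pos = -1
--
--     res = False
--
--     for ds_dict in ds:
--
--         if key in ds_dict.keys():
--
--             key_pos = pos
--
--         pos += 1
--
--     if key_pos != -1:
--
--         del ds[key_pos]
--
--         ds.insert(0, {-1: -1})
--
--         res = True
--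
--     return ds, res
-- ===== SOURCE B (Python) =====
-- def delete_data_from_ds(ds, key):
--     #  Index-free structural recursion: rebuild the list with the LAST dict
--     #  containing key removed (None if no dict contains it), then prepend the
--     #  empty entry and write the result back into ds in place.
--     def without_last_hit(rest):
--         if not rest:
--             return None
--         sub = without_last_hit(rest[1:])
--         if sub is not None:
--             return [rest[0]] + sub
--         if key in rest[0]:
--             return rest[1:]
--         return None
--
--     new = without_last_hit(ds)
--     if new is None:
--         return ds, False
--     ds[:] = [{-1: -1}] + new
--     return ds, True
-- ===== Notes on version B (the rewrite author's own statement) =====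
-- stated objective: alternative
-- what changed: B replaces A's index-tracking forward pass plus del/insert by an index-free structural recursion that rebuilds the list with the last matching dict removed (returning None when absent), then writes the rebuilt list back in place.
import Mathlib
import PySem

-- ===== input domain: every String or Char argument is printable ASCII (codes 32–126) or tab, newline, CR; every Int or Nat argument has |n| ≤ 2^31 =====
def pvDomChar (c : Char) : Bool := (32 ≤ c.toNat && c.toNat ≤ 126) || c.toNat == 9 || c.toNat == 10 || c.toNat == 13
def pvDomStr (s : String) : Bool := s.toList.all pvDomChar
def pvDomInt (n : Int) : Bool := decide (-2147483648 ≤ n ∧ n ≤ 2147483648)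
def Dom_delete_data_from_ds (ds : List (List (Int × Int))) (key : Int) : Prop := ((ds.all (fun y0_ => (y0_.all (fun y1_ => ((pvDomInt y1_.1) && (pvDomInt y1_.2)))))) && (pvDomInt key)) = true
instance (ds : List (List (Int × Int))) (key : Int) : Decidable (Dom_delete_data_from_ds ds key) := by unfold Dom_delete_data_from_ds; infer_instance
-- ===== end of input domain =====

-- B replaces A's index-tracking forward pass plus del/insert by an index-free structural
-- recursion that rebuilds the list without the last matching dict (objective: alternative).
-- Both Pythons mutate ds in place identically; the equivalence proved is about the return value.

-- `key in d.keys()` / `key in d` for a dict represented as an association list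
def pvHasKey (d : List (Int × Int)) (key : Int) : Bool := d.any (fun p => p.1 == key)

-- ===== PORT A =====
-- A's forward loop: state (pos, key_pos); key_pos becomes the last index whose dict has key.
def delete_data_from_ds (ds : List (List (Int × Int))) (key : Int) : (List (List (Int × Int))) × Bool :=
  let st := ds.foldl (fun (st : Int × Int) d =>
      (st.1 + 1, if pvHasKey d key then st.1 else st.2)) (0, -1)
  let key_pos := st.2
  if key_pos ≠ -1 then
    -- key_pos ≥ 0 here, so `del ds[key_pos]` is eraseIdx at key_pos.toNat (exact)
    (([((-1 : Int), (-1 : Int))]) :: ds.eraseIdx key_pos.toNat, true)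
  else
    (ds, false)

-- ===== PORT B =====
-- B's helper without_last_hit: structural recursion returning the list with the last
-- dict containing key removed, or none when no dict contains it.
def withoutLastHit (key : Int) : List (List (Int × Int)) → Option (List (List (Int × Int)))
  | [] => none
  | d :: rest =>
    match withoutLastHit key rest with
    | some sub => some (d :: sub)
    | none => if pvHasKey d key then some rest else none

def delete_data_from_ds_alt (ds : List (List (Int × Int))) (key : Int) : (List (List (Int × Int))) × Bool :=
  match withoutLastHit key ds with
  | some new => (([((-1 : Int), (-1 : Int))]) :: new, true)
  | none => (ds, false)

-- ===== PRECONDITION & SPEC =====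
def Spec_delete_data_from_ds (ds : List (List (Int × Int))) (key : Int) (out : (List (List (Int × Int))) × Bool) : Prop := out = delete_data_from_ds_alt ds key
instance (ds : List (List (Int × Int))) (key : Int) (out : (List (List (Int × Int))) × Bool) : Decidable (Spec_delete_data_from_ds ds key out) := by unfold Spec_delete_data_from_ds; infer_instance

-- ===== CLAIM =====
def Claim_equal_delete_data_from_ds : Prop := ∀ (ds : List (List (Int × Int))) (key : Int), Dom_delete_data_from_ds ds key → Spec_delete_data_from_ds ds key (delete_data_from_ds ds key)

-- ===== LEMMAS AND PROOFS =====

-- the common reference value: index of the LAST dict containing key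
def lastHit (key : Int) : List (List (Int × Int)) → Option Nat
  | [] => none
  | d :: ds =>
    match lastHit key ds with
    | some i => some (i + 1)
    | none => if pvHasKey d key then some 0 else none

theorem foldl_lastHit (key : Int) (ds : List (List (Int × Int))) (p a : Int) :
    (ds.foldl (fun (st : Int × Int) d =>
      (st.1 + 1, if pvHasKey d key then st.1 else st.2)) (p, a)).2
    = match lastHit key ds with
      | some i => p + (i : Int)
      | none => a := by
  induction ds generalizing p a with
  | nil => simp [lastHit]
  | cons d ds ih =>
    simp only [List.foldl_cons, lastHit]
    rw [ih]
    cases h : lastHit key ds with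
    | some i => simp; ring
    | none => by_cases hk : pvHasKey d key = true <;> simp [hk]

theorem withoutLastHit_lastHit (key : Int) (ds : List (List (Int × Int))) :
    withoutLastHit key ds
    = match lastHit key ds with
      | some i => some (ds.eraseIdx i)
      | none => none := by
  induction ds with
  | nil => rfl
  | cons d ds ih =>
    simp only [withoutLastHit, lastHit, ih]
    cases h : lastHit key ds with
    | some i => simp [List.eraseIdx]
    | none => by_cases hk : pvHasKey d key = true <;> simp [hk, List.eraseIdx]

-- ===== VERDICT =====
theorem delete_data_from_ds_spec : Claim_equal_delete_data_from_ds := by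
  intro ds key _
  unfold Spec_delete_data_from_ds delete_data_from_ds delete_data_from_ds_alt
  rw [withoutLastHit_lastHit]
  simp only [foldl_lastHit key ds 0 (-1)]
  cases h : lastHit key ds with
  | some i => simp
  | none => simp
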